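-- pv_equiv track=rewrite | github.com/sergiorochasilva/rest_lib | src/rest_lib/controller/route_base.py | parse_if_none_match
-- ===== SOURCE A (Python) =====
-- from typing import (
--     Callable, Dict, List, Optional, Any, Type, Tuple, Set, Union, Literal
-- )
--
-- def parse_if_none_match(header: str) -> List[str]:
--     """
--     Extrai os valores do header If-None-Match, respeitando aspas e escapes.
--
--     Exemplo:
--     >>> RouteBase.parse_if_none_match('"abc", "a\\"b"')
--     ['abc', 'a"b']
--     >>> RouteBase.parse_if_none_match('"one" , "two" , "three"')
--     ['one', 'two', 'three']
--     >>> RouteBase.parse_if_none_match('"unterminated')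
--     []
--     >>> RouteBase.parse_if_none_match('W/"weak", "strong"')
--     ['weak', 'strong']
--     """
--     i: int = 0
--     header_size: int = len(header)
--     ret: List[str] = []
--     while i < header_size:
--         if header[i] == '"':
--             i += 1
--             buf: List[str] = []
--             while i < header_size:
--                 if header[i] == '\\':
--                     i += 1
--                     if i >= header_size:
--                         # NOTE: Checking if header ends with '\'
--                         break
--                     buf.append(header[i])
--                     i += 1
--                     continue
--
--                 if header[i] == '"':
--                     # NOTE: Append buf here so that if the string is not
--                     #           closed we do not add a incomplete value
--                     i += 1
--                     ret.append(''.join(buf))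
--                     break
--
--                 buf.append(header[i])
--                 i += 1
--                 pass
--             continue
--         i += 1
--         # NOTE: Intentionaly ignoring commas and spaces
--         pass
--     return ret
-- ===== SOURCE B (Python) =====
-- def parse_if_none_match(header):
--     """Single-pass three-state machine (outside / inside-quote / after-backslash)
--     instead of index-based nested while loops."""
--     ret = []
--     state = 0  # 0 outside, 1 inside quotes, 2 just saw backslash
--     buf = []
--     for ch in header:
--         if state == 0:
--             if ch == '"':
--                 state = 1
--                 buf = []
--         elif state == 1:
--             if ch == '\\':
--                 state = 2
--             elif ch == '"':
--                 ret.append(''.join(buf))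
--                 state = 0
--             else:
--                 buf.append(ch)
--         else:
--             buf.append(ch)
--             state = 1
--     return ret
-- ===== Notes on version B (the rewrite author's own statement) =====
-- stated objective: simpler
-- what changed: Replaced A's index-based nested while loops with one linear pass of an explicit three-state machine (outside / inside-quote / after-backslash) folded over the characters.
import Mathlib
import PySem

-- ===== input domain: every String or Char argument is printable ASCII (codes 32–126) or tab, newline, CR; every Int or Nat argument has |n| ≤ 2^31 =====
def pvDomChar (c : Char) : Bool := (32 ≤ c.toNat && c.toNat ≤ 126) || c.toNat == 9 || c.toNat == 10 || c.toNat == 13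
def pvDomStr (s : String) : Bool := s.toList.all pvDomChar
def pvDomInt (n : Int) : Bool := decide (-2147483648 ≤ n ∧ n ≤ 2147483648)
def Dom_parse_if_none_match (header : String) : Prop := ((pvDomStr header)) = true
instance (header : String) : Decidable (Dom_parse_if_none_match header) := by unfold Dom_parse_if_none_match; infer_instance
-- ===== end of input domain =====

-- B replaces A's index-based nested while loops by a single fold of an explicit
-- three-state machine over the characters (objective: simpler).

-- ===== PORT A =====
-- A's two nested while loops, with the cursor i replaced by the remaining suffix of
-- the character list and ret/buf kept as the same accumulators:
-- pvOuterA = the outer loop (skip until '"'); pvInnerA = the inner loop (collect buf,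
-- emit on the closing '"', drop buf if the header ends first); pvEscA = the escape
-- step inside the inner loop (i += 1; break if at the end, else append header[i]).
mutual
def pvOuterA : List Char → List String → List String
  | [], ret => ret
  | c :: rest, ret =>
    if c = '"' then pvInnerA rest [] ret        -- i += 1; buf = []
    else pvOuterA rest ret                      -- ignore commas, spaces, W/, ...
  termination_by structural l => l
def pvInnerA : List Char → List Char → List String → List String
  | [], _, ret => ret
  | c :: rest, buf, ret =>
    if c = '\\' then pvEscA rest buf ret
    else if c = '"' then pvOuterA rest (ret ++ [String.ofList buf])   -- close: append
    else pvInnerA rest (buf ++ [c]) ret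
  termination_by structural l _ _ => l
def pvEscA : List Char → List Char → List String → List String
  | [], _, ret => ret                           -- header ends with '\': break, drop buf
  | c2 :: rest', buf, ret => pvInnerA rest' (buf ++ [c2]) ret
  termination_by structural l _ _ => l
end

def parse_if_none_match (header : String) : List String := pvOuterA header.toList []

-- ===== PORT B =====
-- one step of the state machine: state 0 = outside, 1 = inside quotes, 2 = after backslash
def pvStepB (st : List String × Nat × List Char) (ch : Char) : List String × Nat × List Char :=
  match st with
  | (ret, state, buf) =>
    if state = 0 then
      if ch = '"' then (ret, 1, []) else (ret, 0, buf)
    else if state = 1 then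
      if ch = '\\' then (ret, 2, buf)
      else if ch = '"' then (ret ++ [String.ofList buf], 0, buf)
      else (ret, 1, buf ++ [ch])
    else (ret, 1, buf ++ [ch])

def parse_if_none_match_alt (header : String) : List String :=
  (header.toList.foldl pvStepB ([], 0, [])).1

-- ===== PRECONDITION & SPEC =====
def Spec_parse_if_none_match (header : String) (out : List String) : Prop := out = parse_if_none_match_alt header
instance (header : String) (out : List String) : Decidable (Spec_parse_if_none_match header out) := by unfold Spec_parse_if_none_match; infer_instance

-- ===== CLAIM (what is proved, stated in full; the proofs are below) =====
def Claim_equal_parse_if_none_match : Prop := ∀ (header : String), Dom_parse_if_none_match header → Spec_parse_if_none_match header (parse_if_none_match header)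

-- ===== LEMMAS AND PROOFS =====

theorem pvStepB_0 (ret : List String) (buf : List Char) (ch : Char) :
    pvStepB (ret, 0, buf) ch = if ch = '"' then (ret, 1, []) else (ret, 0, buf) := rfl

theorem pvStepB_1 (ret : List String) (buf : List Char) (ch : Char) :
    pvStepB (ret, 1, buf) ch =
      if ch = '\\' then (ret, 2, buf)
      else if ch = '"' then (ret ++ [String.ofList buf], 0, buf)
      else (ret, 1, buf ++ [ch]) := rfl

theorem pvStepB_2 (ret : List String) (buf : List Char) (ch : Char) :
    pvStepB (ret, 2, buf) ch = (ret, 1, buf ++ [ch]) := rfl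

-- Folding the state machine from state 0 is A's outer loop (buf is stale, irrelevant);
-- from state 1 it is A's inner loop, from state 2 A's escape step, on the same accumulators.
theorem pvFold_states : ∀ (l : List Char) (ret : List String) (buf : List Char),
    (List.foldl pvStepB (ret, 0, buf) l).1 = pvOuterA l ret ∧
    (List.foldl pvStepB (ret, 1, buf) l).1 = pvInnerA l buf ret ∧
    (List.foldl pvStepB (ret, 2, buf) l).1 = pvEscA l buf ret := by
  intro l
  induction l with
  | nil => intro ret buf; simp [pvOuterA, pvInnerA, pvEscA]
  | cons c rest ih =>
    intro ret buf
    refine ⟨?_, ?_, ?_⟩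
    · -- state 0
      rw [List.foldl_cons, pvStepB_0, pvOuterA]
      by_cases hc : c = '"'
      · rw [if_pos hc, if_pos hc, (ih ret []).2.1]
      · rw [if_neg hc, if_neg hc, (ih ret buf).1]
    · -- state 1
      rw [List.foldl_cons, pvStepB_1, pvInnerA]
      by_cases hb : c = '\\'
      · rw [if_pos hb, if_pos hb, (ih ret buf).2.2]
      · rw [if_neg hb, if_neg hb]
        by_cases hq : c = '"'
        · rw [if_pos hq, if_pos hq, (ih (ret ++ [String.ofList buf]) buf).1]
        · rw [if_neg hq, if_neg hq, (ih ret (buf ++ [c])).2.1]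
    · -- state 2
      rw [List.foldl_cons, pvStepB_2, pvEscA, (ih ret (buf ++ [c])).2.1]

-- ===== VERDICT (by name: the statement is the Claim_ definition above) =====
theorem parse_if_none_match_spec : Claim_equal_parse_if_none_match := by
  intro header _
  unfold Spec_parse_if_none_match parse_if_none_match parse_if_none_match_alt
  rw [(pvFold_states header.toList [] []).1]
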